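-- pv_equiv track=rewrite | github.com/ashishsoni-ai/LeetCode_Solutions | 4252-first-unique-even-element/first-unique-even-element.py | firstUniqueEven
-- ===== SOURCE A (Python) =====
-- def firstUniqueEven(nums: list[int]) -> int:
--     freq = {}
--     # Step 1:- Count frequency
--     for num in nums:
--         freq[num] = freq.get(num,0)+1
--     # Step 2:- Find first unique even
--     for num in nums:
--         if num%2==0 and freq[num] == 1:
--             return num
--     return -1
-- ===== SOURCE B (Python) =====
-- def firstUniqueEven(nums: list[int]) -> int:
--     # Sort a copy; values occurring exactly once form runs of length 1 in the
--     # sorted order.  Collect those singleton values, then return the first even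
--     # element of nums that is a singleton.
--     s = sorted(nums)
--     singles = set()
--     i = 0
--     n = len(s)
--     while i < n:
--         j = i + 1
--         while j < n and s[j] == s[i]:
--             j += 1
--         if j == i + 1:
--             singles.add(s[i])
--         i = j
--     for num in nums:
--         if num % 2 == 0 and num in singles:
--             return num
--     return -1
-- ===== Notes on version B (the rewrite author's own statement) =====
-- stated objective: alternative
-- what changed: Replaces the frequency dictionary with sort-then-adjacency: sort a copy, collect values whose sorted run has length 1 into a set, then scan nums for the first even member of that set.
import Mathlib
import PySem

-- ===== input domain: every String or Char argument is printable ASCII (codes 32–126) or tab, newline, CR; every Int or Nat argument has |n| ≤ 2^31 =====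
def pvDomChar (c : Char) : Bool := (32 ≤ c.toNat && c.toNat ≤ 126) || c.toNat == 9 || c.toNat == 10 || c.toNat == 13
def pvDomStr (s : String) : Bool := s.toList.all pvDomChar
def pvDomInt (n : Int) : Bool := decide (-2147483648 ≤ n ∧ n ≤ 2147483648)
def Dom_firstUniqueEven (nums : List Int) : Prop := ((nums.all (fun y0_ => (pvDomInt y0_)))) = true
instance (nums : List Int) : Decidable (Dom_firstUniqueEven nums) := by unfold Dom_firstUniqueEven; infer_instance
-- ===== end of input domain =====

-- B replaces A's frequency dictionary with sort-then-adjacency: sort a copy, collect singleton runs into a set, then scan nums (alternative algorithm, no speed claim).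


-- ===== PORT A =====
-- step 2 loop: first num with num%2==0 and freq[num]==1, else -1
-- (freq[num] ported as getD 0: KeyError is unreachable since every num scanned is in nums, hence a key of freq)
def pvAFind (freq : PySem.Dict Int Int) : List Int → Int
  | [] => -1
  | num :: rest =>
      if PySem.Int.mod num 2 == 0 && freq.getD num 0 == 1 then num else pvAFind freq rest

def firstUniqueEven (nums : List Int) : Int :=
  -- Step 1: count frequency
  let freq := nums.foldl (fun d num => d.insert num (d.getD num 0 + 1)) PySem.Dict.empty
  -- Step 2: find first unique even
  pvAFind freq nums

-- ===== PORT B =====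
-- outer 'while i < n' loop over the sorted list: each step consumes one run of equal
-- values (the inner 'while s[j]==s[i]' is the takeWhile/dropWhile split of the tail);
-- a run of length 1 adds its value to the set of singletons
def pvRuns : List Int → PySem.Set Int → PySem.Set Int
  | [], singles => singles
  | x :: rest, singles =>
      pvRuns (rest.dropWhile (fun y => y == x))
        (if rest.takeWhile (fun y => y == x) = [] then PySem.Set.add singles x
         else singles)
termination_by l _ => l.length
decreasing_by
  simp only [List.length_cons]
  exact Nat.lt_succ_of_le (List.length_dropWhile_le _ _)

-- final for-loop: first even num that is in singles, else -1
def pvBScan (singles : PySem.Set Int) : List Int → Int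
  | [] => -1
  | num :: rest =>
      if PySem.Int.mod num 2 == 0 && PySem.Set.contains singles num then num
      else pvBScan singles rest

def firstUniqueEven_alt (nums : List Int) : Int :=
  let s := PySem.List.sorted nums (fun x => x) false
  let singles := pvRuns s PySem.Set.empty
  pvBScan singles nums

-- ===== PRECONDITION & SPEC =====
def Spec_firstUniqueEven (nums : List Int) (out : Int) : Prop := out = firstUniqueEven_alt nums
instance (nums : List Int) (out : Int) : Decidable (Spec_firstUniqueEven nums out) := by unfold Spec_firstUniqueEven; infer_instance

-- ===== CLAIM (what is proved, stated in full; the proofs are below) =====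
def Claim_equal_firstUniqueEven : Prop := ∀ (nums : List Int), Dom_firstUniqueEven nums → Spec_firstUniqueEven nums (firstUniqueEven nums)

-- ===== LEMMAS AND PROOFS =====

-- after dropping the leading run of x from a sorted tail whose elements are all ≥ x,
-- no copy of x remains
theorem pv_no_x_in_drop (x : Int) (rest : List Int)
    (hle : ∀ y ∈ rest, x ≤ y) (hp : rest.Pairwise (· ≤ ·)) :
    (rest.dropWhile (fun y => y == x)).count x = 0 := by
  rw [List.count_eq_zero]
  intro hx
  set d := rest.dropWhile (fun y => y == x) with hd
  cases hdd : d with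
  | nil => rw [hdd] at hx; simp at hx
  | cons z d' =>
    have hz_ne : (fun y => y == x) z = false := by
      have := List.head?_dropWhile_not (fun y => y == x) rest
      rw [← hd, hdd] at this; simpa using this
    have hz_ne' : z ≠ x := by simpa using hz_ne
    have hdsub : d.Sublist rest := List.dropWhile_sublist _
    have hdp : d.Pairwise (· ≤ ·) := hp.sublist hdsub
    have hz_mem : z ∈ rest := hdsub.mem (hdd ▸ List.mem_cons_self ..)
    have hxz : x < z := lt_of_le_of_ne (hle z hz_mem) (Ne.symm hz_ne')
    rw [hdd] at hx
    rcases List.mem_cons.mp hx with h | h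
    · exact hz_ne' h.symm
    · have : z ≤ x := (List.pairwise_cons.mp (hdd ▸ hdp)).1 x h
      omega

-- on a ≤-sorted list, pvRuns collects exactly the values of count 1 (plus the accumulator)
theorem pv_mem_pvRuns (v : Int) : ∀ (l : List Int) (acc : PySem.Set Int),
    l.Pairwise (· ≤ ·) → (v ∈ pvRuns l acc ↔ v ∈ acc ∨ l.count v = 1) := by
  intro l acc
  induction l, acc using pvRuns.induct with
  | case1 acc => intro _; simp [pvRuns]
  | case2 x rest acc ih =>
    intro hs
    have hle : ∀ y ∈ rest, x ≤ y := (List.pairwise_cons.mp hs).1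
    have hrp : rest.Pairwise (· ≤ ·) := (List.pairwise_cons.mp hs).2
    set t := rest.takeWhile (fun y => y == x) with ht
    set d := rest.dropWhile (fun y => y == x) with hd
    have hdp : d.Pairwise (· ≤ ·) := hrp.sublist (List.dropWhile_sublist _)
    have ih' := ih hdp
    have hsplit : t ++ d = rest := List.takeWhile_append_dropWhile
    have htx : ∀ y ∈ t, y = x := by
      intro y hy
      have := List.mem_takeWhile_imp hy; simpa using this
    have hcount : (x :: rest).count v = (if v = x then 1 + t.length else 0) + d.count v := by
      rw [List.count_cons, ← hsplit, List.count_append]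
      by_cases hvx : v = x
      · subst hvx
        have : t.count v = t.length := List.count_eq_length.mpr (fun y hy => (htx y hy).symm ▸ rfl)
        simp [this]; omega
      · have : t.count v = 0 := List.count_eq_zero.mpr (fun hv => hvx (htx v hv))
        simp [this, hvx, Ne.symm hvx]
    simp only [dite_eq_ite] at ih'
    rw [pvRuns, ← ht, ← hd, ih', hcount]
    by_cases hvx : v = x
    · subst hvx
      have hdx : d.count v = 0 := pv_no_x_in_drop v rest hle hrp
      by_cases htnil : t = []
      · simp [htnil, hdx, PySem.Set.mem_add]
      · simp only [htnil, if_pos, hdx, ite_false]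
        constructor
        · rintro (h | h)
          · exact Or.inl h
          · omega
        · rintro (h | h)
          · exact Or.inl h
          · exfalso
            have : t.length = 0 := by omega
            exact htnil (List.length_eq_zero_iff.mp this)
    · by_cases htnil : t = [] <;> simp [htnil, PySem.Set.mem_add, hvx]

-- membership in B's singleton set is "count 1 in nums"
theorem pv_mem_singles (nums : List Int) (v : Int) :
    v ∈ pvRuns (PySem.List.sorted nums (fun x => x) false) PySem.Set.empty
      ↔ nums.count v = 1 := by
  set s := PySem.List.sorted nums (fun x => x) false with hsdef
  have hp : s.Pairwise (· ≤ ·) := PySem.List.sorted_pairwise nums (fun x => x)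
  have hperm : s.Perm nums := PySem.List.sorted_perm nums (fun x => x) false
  rw [pv_mem_pvRuns v s PySem.Set.empty hp, hperm.count_eq]
  simp [PySem.Set.empty]

-- the two scan loops agree when the boolean tests agree pointwise
theorem pv_scan_eq (freq : PySem.Dict Int Int) (singles : PySem.Set Int)
    (h : ∀ v, (freq.getD v 0 == (1 : Int)) = PySem.Set.contains singles v) :
    ∀ l, pvAFind freq l = pvBScan singles l := by
  intro l
  induction l with
  | nil => rfl
  | cons x xs ih => simp only [pvAFind, pvBScan, h, ih]

-- ===== VERDICT (by name: the statement is the Claim_ definition above) =====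
theorem firstUniqueEven_spec : Claim_equal_firstUniqueEven := by
  intro nums _
  unfold Spec_firstUniqueEven firstUniqueEven firstUniqueEven_alt
  refine pv_scan_eq _ _ ?_ nums
  intro v
  rw [PySem.Dict.getD_foldl_insert_add_one, PySem.Dict.getD_empty]
  have hmem := pv_mem_singles nums v
  rw [← PySem.Set.contains_iff] at hmem
  by_cases hcv : nums.count v = 1
  · rw [hmem.mpr hcv, hcv]; simp
  · have hfalse : PySem.Set.contains (pvRuns (PySem.List.sorted nums (fun x => x) false) PySem.Set.empty) v = false := by
      rw [← Bool.not_eq_true, hmem]; exact hcv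
    rw [hfalse, beq_eq_false_iff_ne]
    intro h
    apply hcv
    omega
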